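-- pv_equiv track=rewrite | github.com/DarkAce65/advent-of-code | 2023/day14.py | slide_rocks_west
-- ===== SOURCE A (Python) =====
-- Position = tuple[int, int]
--
-- def slide_rocks_west(
--     num_rows: int, num_cols: int, cube_rocks: set[Position], round_rocks: set[Position]
-- ) -> set[Position]:
--     moved_round_rocks: set[Position] = set()
--
--     for row in range(num_rows):
--         num_rocks = 0
--         for col in range(num_cols - 1, -1, -1):
--             if (row, col) in cube_rocks:
--                 for c in range(num_rocks):
--                     moved_round_rocks.add((row, col + c + 1))
--                 num_rocks = 0
--                 continue
--             if (row, col) in round_rocks: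
--                 num_rocks += 1
--
--             if col == 0:
--                 for c in range(num_rocks):
--                     moved_round_rocks.add((row, col + c))
--
--     return moved_round_rocks
-- ===== SOURCE B (Python) =====
-- Position = tuple[int, int]
--
-- def slide_rocks_west(
--     num_rows: int, num_cols: int, cube_rocks: set[Position], round_rocks: set[Position]
-- ) -> set[Position]:
--     # Collect only the rocks that are inside the grid, tag cubes, and sort them
--     # by (row ascending, column descending): one O(R log R) sweep instead of
--     # scanning every grid cell.
--     events = [(r, c, True) for (r, c) in cube_rocks
--               if 0 <= r < num_rows and 0 <= c < num_cols]
--     events += [(r, c, False) for (r, c) in round_rocks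
--                if 0 <= r < num_rows and 0 <= c < num_cols and (r, c) not in cube_rocks]
--     events.sort(key=lambda e: (e[0], -e[1]))
--
--     moved_round_rocks: set[Position] = set()
--     cur_row = None
--     count = 0
--     for r, c, is_cube in events:
--         if cur_row != r:
--             for k in range(count):
--                 moved_round_rocks.add((cur_row, k))
--             cur_row = r
--             count = 0
--         if is_cube:
--             for k in range(count):
--                 moved_round_rocks.add((r, c + 1 + k))
--             count = 0
--         else:
--             count += 1
--     for k in range(count):
--         moved_round_rocks.add((cur_row, k))
--     return moved_round_rocks
-- ===== Notes on version B (the rewrite author's own statement) =====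
-- stated objective: faster
-- what changed: A scans every one of the num_rows*num_cols grid cells per slide; B only touches the rocks themselves: it filters the in-grid rocks, sorts them by (row asc, col desc) and resolves each row in one linear sweep with a pending-round counter, O(R log R) in the number R of rocks.
import Mathlib
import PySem

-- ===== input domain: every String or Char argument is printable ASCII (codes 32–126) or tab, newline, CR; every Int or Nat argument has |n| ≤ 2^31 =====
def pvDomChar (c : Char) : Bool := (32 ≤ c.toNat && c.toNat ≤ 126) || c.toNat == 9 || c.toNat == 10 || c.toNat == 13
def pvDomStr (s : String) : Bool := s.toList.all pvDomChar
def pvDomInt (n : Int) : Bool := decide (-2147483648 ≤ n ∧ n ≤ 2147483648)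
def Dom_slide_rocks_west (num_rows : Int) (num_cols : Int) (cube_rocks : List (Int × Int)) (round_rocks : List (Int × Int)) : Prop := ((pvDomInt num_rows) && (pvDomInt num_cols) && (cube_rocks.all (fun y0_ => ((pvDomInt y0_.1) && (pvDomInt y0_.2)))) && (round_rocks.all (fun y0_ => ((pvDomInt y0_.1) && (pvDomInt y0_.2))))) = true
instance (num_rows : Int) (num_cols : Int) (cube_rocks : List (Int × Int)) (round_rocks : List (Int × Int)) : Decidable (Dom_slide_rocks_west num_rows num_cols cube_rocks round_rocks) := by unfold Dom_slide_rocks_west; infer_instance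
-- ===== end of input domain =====

-- B replaces A's scan of every grid cell by one sort of the kept rocks (row asc, col desc)
-- followed by a single sweep; equivalence is about the returned rock list (no mutation).

-- ===== PORT A =====
def slide_rocks_west (num_rows : Int) (num_cols : Int) (cube_rocks : List (Int × Int)) (round_rocks : List (Int × Int)) : List (Int × Int) :=
  (PySem.List.pyRange 0 num_rows 1).foldl
    (fun moved row =>
      ((PySem.List.pyRange (num_cols - 1) (-1) (-1)).foldl
        (fun (st : List (Int × Int) × Int) col =>
          if (row, col) ∈ cube_rocks then
            ((PySem.List.pyRange 0 st.2 1).foldl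
              (fun m c => PySem.Set.add m (row, col + c + 1)) st.1, 0)
          else
            let numRocks := if (row, col) ∈ round_rocks then st.2 + 1 else st.2
            if col = 0 then
              ((PySem.List.pyRange 0 numRocks 1).foldl
                (fun m c => PySem.Set.add m (row, col + c)) st.1, numRocks)
            else (st.1, numRocks))
        (moved, (0 : Int))).1)
    PySem.Set.empty

-- ===== PORT B =====
-- transliteration of Source B: filter the in-grid rocks, sort (row asc, col desc), one sweep.
-- `cur_row` is Python's None-initialised variable, hence Option Int; in the final
-- flushes a positive count guarantees cur_row ≠ None, `.getD 0` only totalizes the match.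
def slide_rocks_west_alt (num_rows : Int) (num_cols : Int) (cube_rocks : List (Int × Int)) (round_rocks : List (Int × Int)) : List (Int × Int) :=
  let events : List (Int × Int × Bool) :=
    (cube_rocks.filter (fun rc =>
        decide (0 ≤ rc.1) && decide (rc.1 < num_rows) && decide (0 ≤ rc.2) && decide (rc.2 < num_cols))).map
      (fun rc => (rc.1, rc.2, true))
    ++ (round_rocks.filter (fun rc =>
        decide (0 ≤ rc.1) && decide (rc.1 < num_rows) && decide (0 ≤ rc.2) && decide (rc.2 < num_cols)
          && !(decide (rc ∈ cube_rocks)))).map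
      (fun rc => (rc.1, rc.2, false))
  let sortedEvents := PySem.List.sorted2 events (fun e => e.1) (fun e => -e.2.1) false
  let final := sortedEvents.foldl
    (fun (st : List (Int × Int) × Option Int × Int) e =>
      let st1 :=
        if st.2.1 ≠ some e.1 then
          (((PySem.List.pyRange 0 st.2.2 1).foldl
              (fun m k => PySem.Set.add m (st.2.1.getD 0, k)) st.1), some e.1, (0 : Int))
        else st
      if e.2.2 then
        (((PySem.List.pyRange 0 st1.2.2 1).foldl
            (fun m k => PySem.Set.add m (e.1, e.2.1 + 1 + k)) st1.1), st1.2.1, (0 : Int))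
      else (st1.1, st1.2.1, st1.2.2 + 1))
    ([], none, (0 : Int))
  (PySem.List.pyRange 0 final.2.2 1).foldl
    (fun m k => PySem.Set.add m (final.2.1.getD 0, k)) final.1

-- ===== PRECONDITION & SPEC =====
-- The list arguments model Python sets, so Pre_ only requires them to hold distinct
-- elements (every input produced from an actual Python set satisfies it).
def Pre_slide_rocks_west (num_rows : Int) (num_cols : Int) (cube_rocks : List (Int × Int)) (round_rocks : List (Int × Int)) : Prop :=
  cube_rocks.Nodup ∧ round_rocks.Nodup
instance (num_rows : Int) (num_cols : Int) (cube_rocks : List (Int × Int)) (round_rocks : List (Int × Int)) : Decidable (Pre_slide_rocks_west num_rows num_cols cube_rocks round_rocks) := by unfold Pre_slide_rocks_west; infer_instance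

def pvWitness_slide_rocks_west : Int × Int × (List (Int × Int)) × (List (Int × Int)) :=
  (2, 3, [(0, 1)], [(0, 2), (1, 0)])

def Spec_slide_rocks_west (num_rows : Int) (num_cols : Int) (cube_rocks : List (Int × Int)) (round_rocks : List (Int × Int)) (out : List (Int × Int)) : Prop := out = slide_rocks_west_alt num_rows num_cols cube_rocks round_rocks
instance (num_rows : Int) (num_cols : Int) (cube_rocks : List (Int × Int)) (round_rocks : List (Int × Int)) (out : List (Int × Int)) : Decidable (Spec_slide_rocks_west num_rows num_cols cube_rocks round_rocks out) := by unfold Spec_slide_rocks_west; infer_instance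

-- ===== CLAIM (what is proved, stated in full; the proofs are below) =====
def Claim_equal_slide_rocks_west : Prop := ∀ (num_rows : Int) (num_cols : Int) (cube_rocks : List (Int × Int)) (round_rocks : List (Int × Int)), Dom_slide_rocks_west num_rows num_cols cube_rocks round_rocks → Pre_slide_rocks_west num_rows num_cols cube_rocks round_rocks → Spec_slide_rocks_west num_rows num_cols cube_rocks round_rocks (slide_rocks_west num_rows num_cols cube_rocks round_rocks)

-- ===== LEMMAS AND PROOFS =====

theorem set_add_not_mem {x : Int × Int} {m : List (Int × Int)} (h : x ∉ m) :
    PySem.Set.add m x = m ++ [x] := by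
  simp [PySem.Set.add, h]

def flushVals (r s k : Int) : List (Int × Int) :=
  (PySem.List.pyRange 0 k 1).map (fun j => (r, s + j))

theorem mem_flushVals {p : Int × Int} {r s k : Int} :
    p ∈ flushVals r s k ↔ p.1 = r ∧ s ≤ p.2 ∧ p.2 < s + k := by
  simp only [flushVals, List.mem_map, PySem.List.mem_pyRange_one]
  constructor
  · rintro ⟨j, ⟨h0, hk⟩, rfl⟩; exact ⟨rfl, by omega, by omega⟩
  · rintro ⟨h1, h2, h3⟩
    exact ⟨p.2 - s, ⟨by omega, by omega⟩, by cases p with | mk a b => simp_all⟩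

theorem flushVals_succ {r s k : Int} (hk : 0 ≤ k) :
    flushVals r s (k + 1) = flushVals r s k ++ [(r, s + k)] := by
  simp [flushVals, PySem.List.pyRange_one_succ_right hk]

theorem flush_fold {r s : Int} : ∀ (k : Int) (m : List (Int × Int)),
    (∀ j, 0 ≤ j → j < k → (r, s + j) ∉ m) →
    (PySem.List.pyRange 0 k 1).foldl (fun m' c => PySem.Set.add m' (r, s + c)) m
      = m ++ flushVals r s k := by
  have main : ∀ (n : Nat) (m : List (Int × Int)),
      (∀ j, 0 ≤ j → j < (n : Int) → (r, s + j) ∉ m) →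
      (PySem.List.pyRange 0 (n : Int) 1).foldl (fun m' c => PySem.Set.add m' (r, s + c)) m
        = m ++ flushVals r s (n : Int) := by
    intro n
    induction n with
    | zero => intro m _; simp [flushVals, PySem.List.pyRange_one_eq_nil]
    | succ n ih =>
      intro m hm
      have hcast : ((n + 1 : Nat) : Int) = (n : Int) + 1 := by push_cast; ring
      rw [hcast, PySem.List.pyRange_one_succ_right (by positivity), List.foldl_append,
        flushVals_succ (by positivity)]
      rw [ih m (fun j h0 hj => hm j h0 (by omega))]
      simp only [List.foldl_cons, List.foldl_nil]
      rw [set_add_not_mem, List.append_assoc]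
      intro hmem
      rcases List.mem_append.mp hmem with h1 | h2
      · exact hm (n : Int) (by positivity) (by omega) h1
      · rcases mem_flushVals.mp h2 with ⟨_, _, h3⟩; omega
  intro k m hm
  by_cases hk : k ≤ 0
  · simp [PySem.List.pyRange_one_eq_nil hk, flushVals]
  · have hteq : k = ((k.toNat : Nat) : Int) := by omega
    rw [hteq]; exact main k.toNat m (by rw [← hteq]; exact hm)

def evAt (cube round : List (Int × Int)) (r c : Int) : Option Bool :=
  if (r, c) ∈ cube then some true else if (r, c) ∈ round then some false else none

def colEvts (cube round : List (Int × Int)) (r t : Int) : List (Int × Bool) :=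
  (PySem.List.pyRange t (-1) (-1)).filterMap
    (fun c => (evAt cube round r c).map (fun b => (c, b)))

def runRow (r : Int) : List (Int × Bool) → Int → List (Int × Int) × Int
  | [], k => ([], k)
  | (c, b) :: rest, k =>
    if b then
      let t := runRow r rest 0
      (flushVals r (c + 1) k ++ t.1, t.2)
    else runRow r rest (k + 1)

theorem runRow_fst {r : Int} : ∀ (ev : List (Int × Bool)) (k : Int) (p : Int × Int),
    p ∈ (runRow r ev k).1 → p.1 = r := by
  intro ev
  induction ev with
  | nil => intro k p h; simp [runRow] at h
  | cons cb rest ih =>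
    intro k p h
    obtain ⟨c, b⟩ := cb
    by_cases hb : b
    · simp [runRow, hb] at h
      rcases h with h | h
      · exact (mem_flushVals.mp h).1
      · exact ih 0 p h
    · simp [runRow, hb] at h; exact ih (k + 1) p h

theorem runRow_cnt_nonneg {r : Int} : ∀ (ev : List (Int × Bool)) (k : Int), 0 ≤ k →
    0 ≤ (runRow r ev k).2 := by
  intro ev
  induction ev with
  | nil => intro k hk; simpa [runRow] using hk
  | cons cb rest ih =>
    intro k hk
    obtain ⟨c, b⟩ := cb
    by_cases hb : b
    · simp [runRow, hb]; exact ih 0 (by omega)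
    · simp [runRow, hb]; exact ih (k + 1) (by omega)

theorem colEvts_cons (cube round : List (Int × Int)) (r t : Int) (ht : 0 ≤ t) :
    colEvts cube round r t
      = ((evAt cube round r t).map (fun b => (t, b))).toList ++ colEvts cube round r (t - 1) := by
  rw [colEvts, PySem.List.pyRange_neg_one_cons (show (-1:Int) < t by omega), List.filterMap_cons]
  rcases h : evAt cube round r t with _ | b <;> simp [h, colEvts]

theorem mem_colEvts {cube round : List (Int × Int)} {r t : Int} {cb : Int × Bool} :
    cb ∈ colEvts cube round r t ↔ 0 ≤ cb.1 ∧ cb.1 ≤ t ∧ evAt cube round r cb.1 = some cb.2 := by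
  simp only [colEvts, List.mem_filterMap, PySem.List.mem_pyRange_neg_one, Option.map_eq_some_iff]
  constructor
  · rintro ⟨c, ⟨h1, h2⟩, b, hev, rfl⟩; exact ⟨by omega, h2, hev⟩
  · rintro ⟨h1, h2, hev⟩
    exact ⟨cb.1, ⟨by omega, h2⟩, cb.2, hev, rfl⟩

theorem colEvts_pairwise (cube round : List (Int × Int)) (r t : Int) :
    (colEvts cube round r t).Pairwise (fun a b => b.1 < a.1) := by
  rw [colEvts, List.pairwise_filterMap]
  have h : (PySem.List.pyRange t (-1) (-1)).Pairwise (fun a b => b < a) := by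
    rw [PySem.List.pyRange_neg_one_eq_reverse, List.pairwise_reverse]
    exact PySem.List.pairwise_lt_pyRange_one _ _
  refine h.imp_of_mem ?_
  intro a b _ _ hab
  intro cb hcb cb' hcb'
  rcases Option.map_eq_some_iff.mp hcb with ⟨x, _, rfl⟩
  rcases Option.map_eq_some_iff.mp hcb' with ⟨y, _, rfl⟩
  simpa using hab

theorem flush_fold_shift {r t : Int} (k : Int) (m : List (Int × Int))
    (h : ∀ j, 0 ≤ j → j < k → (r, t + 1 + j) ∉ m) :
    (PySem.List.pyRange 0 k 1).foldl (fun m' c => PySem.Set.add m' (r, t + c + 1)) m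
      = m ++ flushVals r (t + 1) k := by
  have he : (fun (m' : List (Int × Int)) c => PySem.Set.add m' (r, t + c + 1))
      = (fun m' c => PySem.Set.add m' (r, (t + 1) + c)) := by
    funext m' c; ring_nf
  rw [he]; exact flush_fold k m h

def stepA (cube round : List (Int × Int)) (row : Int)
    (st : List (Int × Int) × Int) (col : Int) : List (Int × Int) × Int :=
  if (row, col) ∈ cube then
    ((PySem.List.pyRange 0 st.2 1).foldl
      (fun m c => PySem.Set.add m (row, col + c + 1)) st.1, 0)
  else
    let numRocks := if (row, col) ∈ round then st.2 + 1 else st.2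
    if col = 0 then
      ((PySem.List.pyRange 0 numRocks 1).foldl
        (fun m c => PySem.Set.add m (row, col + c)) st.1, numRocks)
    else (st.1, numRocks)


theorem evAt_none_iff {cube round : List (Int × Int)} {r c : Int} :
    evAt cube round r c = none ↔ (r, c) ∉ cube ∧ (r, c) ∉ round := by
  unfold evAt; by_cases h1 : (r, c) ∈ cube <;> by_cases h2 : (r, c) ∈ round <;> simp [h1, h2]

theorem evAt_true_iff {cube round : List (Int × Int)} {r c : Int} :
    evAt cube round r c = some true ↔ (r, c) ∈ cube := by
  unfold evAt; by_cases h1 : (r, c) ∈ cube <;> by_cases h2 : (r, c) ∈ round <;> simp [h1, h2]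

theorem evAt_false_iff {cube round : List (Int × Int)} {r c : Int} :
    evAt cube round r c = some false ↔ (r, c) ∉ cube ∧ (r, c) ∈ round := by
  unfold evAt; by_cases h1 : (r, c) ∈ cube <;> by_cases h2 : (r, c) ∈ round <;> simp [h1, h2]

theorem innerA (cube round : List (Int × Int)) (r : Int) :
    ∀ (n : Nat) (k : Int) (m : List (Int × Int)), 0 ≤ k →
    (∀ p ∈ m, p.1 = r → (n : Int) + k < p.2) →
    ((PySem.List.pyRange (n : Int) (-1) (-1)).foldl (stepA cube round r) (m, k)).1
      = m ++ (runRow r (colEvts cube round r (n : Int)) k).1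
          ++ flushVals r 0 (runRow r (colEvts cube round r (n : Int)) k).2 := by
  intro n
  induction n with
  | zero =>
    intro k m hk hm
    have hrange : PySem.List.pyRange (0 : Int) (-1) (-1) = [0] := by
      rw [PySem.List.pyRange_neg_one_cons (by omega : (-1:Int) < 0),
        PySem.List.pyRange_neg_one_eq_nil (by omega : (0:Int) - 1 ≤ -1)]
    have hce : colEvts cube round r 0
        = ((evAt cube round r 0).map (fun b => (0, b))).toList ++ colEvts cube round r (-1) := by
      simpa using colEvts_cons cube round r 0 le_rfl
    have hnil : colEvts cube round r (-1) = [] := by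
      simp [colEvts, PySem.List.pyRange_neg_one_eq_nil (le_refl (-1:Int))]
    rw [hnil, List.append_nil] at hce
    simp only [Nat.cast_zero, hrange, List.foldl_cons, List.foldl_nil]
    rcases hev : evAt cube round r 0 with _ | b
    · obtain ⟨hcu, hro⟩ := evAt_none_iff.mp hev
      simp only [stepA, if_neg hcu, if_neg hro, if_pos rfl]
      rw [flush_fold k m (fun j h0 hj hmem => by
        have := hm _ hmem rfl; simp at this; omega)]
      simp [hce, hev, runRow]
    · cases b
      · obtain ⟨hcu, hro⟩ := evAt_false_iff.mp hev
        simp only [stepA, if_neg hcu, if_pos hro, if_pos rfl]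
        rw [flush_fold (k + 1) m (fun j h0 hj hmem => by
          have := hm _ hmem rfl; simp at this; omega)]
        simp [hce, hev, runRow]
      · have hcu := evAt_true_iff.mp hev
        simp only [stepA, if_pos hcu]
        rw [flush_fold_shift (t := 0) k m (fun j h0 hj hmem => by
          have := hm _ hmem rfl; simp at this; omega)]
        simp [hce, hev, runRow, flushVals, PySem.List.pyRange_one_eq_nil]
  | succ n ih =>
    intro k m hk hm
    have hcast : ((n + 1 : Nat) : Int) = (n : Int) + 1 := by push_cast; ring
    rw [hcast] at *
    have hrange : PySem.List.pyRange ((n : Int) + 1) (-1) (-1)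
        = ((n : Int) + 1) :: PySem.List.pyRange ((n : Int)) (-1) (-1) := by
      rw [PySem.List.pyRange_neg_one_cons (by omega : (-1:Int) < (n : Int) + 1)]
      norm_num
    have hce : colEvts cube round r ((n : Int) + 1)
        = ((evAt cube round r ((n : Int) + 1)).map (fun b => ((n : Int) + 1, b))).toList
            ++ colEvts cube round r ((n : Int)) := by
      simpa using colEvts_cons cube round r ((n : Int) + 1) (by omega)
    rw [hrange]
    simp only [List.foldl_cons]
    have hne : ¬((n : Int) + 1 = 0) := by omega
    rcases hev : evAt cube round r ((n : Int) + 1) with _ | b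
    · obtain ⟨hcu, hro⟩ := evAt_none_iff.mp hev
      simp only [stepA, if_neg hcu, if_neg hro, if_neg hne]
      rw [ih k m hk (fun p hp hpr => by have := hm p hp hpr; omega)]
      simp [hce, hev]
    · cases b
      · obtain ⟨hcu, hro⟩ := evAt_false_iff.mp hev
        simp only [stepA, if_neg hcu, if_pos hro, if_neg hne]
        rw [ih (k + 1) m (by omega) (fun p hp hpr => by have := hm p hp hpr; omega)]
        simp [hce, hev, runRow]
      · have hcu := evAt_true_iff.mp hev
        simp only [stepA, if_pos hcu]
        rw [flush_fold_shift (t := (n : Int) + 1) k m (fun j h0 hj hmem => by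
          have := hm _ hmem rfl; simp at this; omega)]
        rw [ih 0 (m ++ flushVals r ((n : Int) + 1 + 1) k) (le_refl 0) (by
          intro p hp hpr
          rcases List.mem_append.mp hp with h1 | h1
          · have := hm p h1 hpr; omega
          · rcases mem_flushVals.mp h1 with ⟨_, h2, _⟩; omega)]
        simp only [hce, hev, Option.map_some, Option.toList_some, List.singleton_append]
        simp [runRow]

def outRow (num_cols : Int) (cube round : List (Int × Int)) (r : Int) : List (Int × Int) :=
  (runRow r (colEvts cube round r (num_cols - 1)) 0).1
    ++ flushVals r 0 (runRow r (colEvts cube round r (num_cols - 1)) 0).2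

theorem rowA (num_cols : Int) (cube round : List (Int × Int)) (r : Int)
    (m : List (Int × Int)) (hm : ∀ p ∈ m, p.1 ≠ r) :
    ((PySem.List.pyRange (num_cols - 1) (-1) (-1)).foldl (stepA cube round r) (m, 0)).1
      = m ++ outRow num_cols cube round r := by
  by_cases hc : num_cols ≤ 0
  · have h1 : PySem.List.pyRange (num_cols - 1) (-1) (-1) = [] :=
      PySem.List.pyRange_neg_one_eq_nil (by omega)
    have h2 : colEvts cube round r (num_cols - 1) = [] := by
      simp [colEvts, h1]
    simp [h1, h2, outRow, runRow, flushVals, PySem.List.pyRange_one_eq_nil]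
  · have hn : ((num_cols - 1).toNat : Int) = num_cols - 1 := by omega
    rw [outRow, ← hn, ← List.append_assoc]
    exact innerA cube round r (num_cols - 1).toNat 0 m le_rfl
      (fun p hp hpr => absurd hpr (hm p hp))

theorem mem_outRow {num_cols : Int} {cube round : List (Int × Int)} {r : Int} {p : Int × Int}
    (h : p ∈ outRow num_cols cube round r) : p.1 = r := by
  rcases List.mem_append.mp h with h1 | h1
  · exact runRow_fst _ _ _ h1
  · exact (mem_flushVals.mp h1).1

theorem outerA_gen (num_cols : Int) (cube round : List (Int × Int)) :
    ∀ (l : List Int), l.Nodup → ∀ (m : List (Int × Int)), (∀ p ∈ m, p.1 ∉ l) →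
    l.foldl (fun moved row =>
        ((PySem.List.pyRange (num_cols - 1) (-1) (-1)).foldl (stepA cube round row) (moved, 0)).1) m
      = m ++ l.flatMap (outRow num_cols cube round) := by
  intro l
  induction l with
  | nil => intro _ m _; simp
  | cons r l' ih =>
    intro hnd m hm
    simp only [List.foldl_cons, List.flatMap_cons]
    rw [rowA num_cols cube round r m (fun p hp heq =>
      hm p hp (heq ▸ List.mem_cons_self))]
    rw [ih hnd.of_cons (m ++ outRow num_cols cube round r) (by
      intro p hp hpl
      rcases List.mem_append.mp hp with h1 | h1
      · exact hm p h1 (List.mem_cons_of_mem _ hpl)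
      · have := mem_outRow h1
        exact (List.nodup_cons.mp hnd).1 (this ▸ hpl))]
    simp

theorem A_flat (num_rows num_cols : Int) (cube round : List (Int × Int)) :
    slide_rocks_west num_rows num_cols cube round
      = (PySem.List.pyRange 0 num_rows 1).flatMap (outRow num_cols cube round) := by
  have hdef : slide_rocks_west num_rows num_cols cube round
      = (PySem.List.pyRange 0 num_rows 1).foldl
          (fun moved row =>
            ((PySem.List.pyRange (num_cols - 1) (-1) (-1)).foldl
              (stepA cube round row) (moved, 0)).1) [] := rfl
  rw [hdef, outerA_gen num_cols cube round _ (PySem.List.nodup_pyRange_one 0 num_rows) [] (by simp)]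
  simp

def eventsOf (num_rows num_cols : Int) (cube round : List (Int × Int)) : List (Int × Int × Bool) :=
  (cube.filter (fun rc =>
      decide (0 ≤ rc.1) && decide (rc.1 < num_rows) && decide (0 ≤ rc.2) && decide (rc.2 < num_cols))).map
    (fun rc => (rc.1, rc.2, true))
  ++ (round.filter (fun rc =>
      decide (0 ≤ rc.1) && decide (rc.1 < num_rows) && decide (0 ≤ rc.2) && decide (rc.2 < num_cols)
        && !(decide (rc ∈ cube)))).map
    (fun rc => (rc.1, rc.2, false))

def rowsOf (num_rows num_cols : Int) (cube round : List (Int × Int)) : List Int :=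
  (PySem.List.pyRange 0 num_rows 1).filter
    (fun r => !(colEvts cube round r (num_cols - 1)).isEmpty)

def blocksOf (num_cols : Int) (cube round : List (Int × Int)) (rs : List Int) : List (Int × Int × Bool) :=
  rs.flatMap (fun r => (colEvts cube round r (num_cols - 1)).map (fun cb => (r, cb.1, cb.2)))

def LexLt (a b : Int × Int × Bool) : Prop := a.1 < b.1 ∨ (a.1 = b.1 ∧ -a.2.1 < -b.2.1)

theorem mem_eventsOf {num_rows num_cols : Int} {cube round : List (Int × Int)} {e : Int × Int × Bool} :
    e ∈ eventsOf num_rows num_cols cube round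
      ↔ 0 ≤ e.1 ∧ e.1 < num_rows ∧ 0 ≤ e.2.1 ∧ e.2.1 < num_cols
          ∧ evAt cube round e.1 e.2.1 = some e.2.2 := by
  obtain ⟨r, c, b⟩ := e
  simp only [eventsOf, List.mem_append, List.mem_map, List.mem_filter]
  constructor
  · rintro (⟨⟨rc1, rc2⟩, ⟨hmem, hcond⟩, heq⟩ | ⟨⟨rc1, rc2⟩, ⟨hmem, hcond⟩, heq⟩) <;>
      (injection heq with h1 h23; injection h23 with h2 h3; subst h1; subst h2; subst h3) <;>
      simp only [Bool.and_eq_true, decide_eq_true_eq, Bool.not_eq_true'] at hcond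
    · exact ⟨hcond.1.1.1, hcond.1.1.2, hcond.1.2, hcond.2, evAt_true_iff.mpr hmem⟩
    · refine ⟨hcond.1.1.1.1, hcond.1.1.1.2, hcond.1.1.2, hcond.1.2, evAt_false_iff.mpr ⟨?_, hmem⟩⟩
      simpa using hcond.2
  · rintro ⟨h1, h2, h3, h4, hev⟩
    cases b
    · obtain ⟨hnc, hin⟩ := evAt_false_iff.mp hev
      right
      exact ⟨(r, c), ⟨hin, by simp [h1, h2, h3, h4, hnc]⟩, rfl⟩
    · left
      exact ⟨(r, c), ⟨evAt_true_iff.mp hev, by simp [h1, h2, h3, h4]⟩, rfl⟩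

theorem nodup_eventsOf {num_rows num_cols : Int} {cube round : List (Int × Int)}
    (hc : cube.Nodup) (hr : round.Nodup) :
    (eventsOf num_rows num_cols cube round).Nodup := by
  rw [eventsOf, List.nodup_append]
  refine ⟨(hc.filter _).map (fun a b h => by
      injection h with h1 h23; injection h23 with h2 _; exact Prod.ext h1 h2),
    (hr.filter _).map (fun a b h => by
      injection h with h1 h23; injection h23 with h2 _; exact Prod.ext h1 h2), ?_⟩
  intro a ha b hb
  rcases List.mem_map.mp ha with ⟨x, _, hx⟩
  rcases List.mem_map.mp hb with ⟨y, _, hy⟩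
  intro heq
  rw [← hx, ← hy] at heq
  injection heq with _ h23; injection h23 with _ h3; exact Bool.noConfusion h3

theorem key_inj {num_rows num_cols : Int} {cube round : List (Int × Int)}
    {a b : Int × Int × Bool}
    (ha : a ∈ eventsOf num_rows num_cols cube round)
    (hb : b ∈ eventsOf num_rows num_cols cube round)
    (h1 : a.1 = b.1) (h2 : a.2.1 = b.2.1) : a = b := by
  obtain ⟨ar, ac, ab⟩ := a
  obtain ⟨br, bc, bb⟩ := b
  simp only at h1 h2; subst h1; subst h2
  have hea := (mem_eventsOf.mp ha).2.2.2.2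
  have heb := (mem_eventsOf.mp hb).2.2.2.2
  simp only at hea heb
  rw [hea] at heb
  injection heb with h3
  rw [h3]

theorem mem_blocks {num_rows num_cols : Int} {cube round : List (Int × Int)} {e : Int × Int × Bool} :
    e ∈ blocksOf num_cols cube round (rowsOf num_rows num_cols cube round)
      ↔ 0 ≤ e.1 ∧ e.1 < num_rows ∧ 0 ≤ e.2.1 ∧ e.2.1 < num_cols
          ∧ evAt cube round e.1 e.2.1 = some e.2.2 := by
  obtain ⟨r, c, b⟩ := e
  simp only [blocksOf, rowsOf, List.mem_flatMap, List.mem_filter, List.mem_map,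
    PySem.List.mem_pyRange_one]
  constructor
  · rintro ⟨r', ⟨⟨hr0, hrR⟩, _⟩, ⟨c', b'⟩, hmem, heq⟩
    injection heq with h1 h23; injection h23 with h2 h3
    subst h1; subst h2; subst h3
    have := mem_colEvts.mp hmem
    exact ⟨hr0, hrR, this.1, by omega, this.2.2⟩
  · rintro ⟨h1, h2, h3, h4, hev⟩
    refine ⟨r, ⟨⟨h1, h2⟩, ?_⟩, (c, b), mem_colEvts.mpr ⟨h3, by omega, hev⟩, rfl⟩
    have : (c, b) ∈ colEvts cube round r (num_cols - 1) :=
      mem_colEvts.mpr ⟨h3, by omega, hev⟩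
    simp only [Bool.not_eq_eq_eq_not, Bool.not_true, List.isEmpty_eq_false_iff,
      List.isEmpty_iff]
    intro hnil
    rw [hnil] at this
    exact (List.not_mem_nil) this

theorem blocks_pairwise_gen (num_cols : Int) (cube round : List (Int × Int)) :
    ∀ (rs : List Int), rs.Pairwise (· < ·) →
    (blocksOf num_cols cube round rs).Pairwise LexLt := by
  intro rs
  induction rs with
  | nil => intro _; simp [blocksOf]
  | cons r rs ih =>
    intro hp
    simp only [blocksOf, List.flatMap_cons]
    rw [List.pairwise_append]
    refine ⟨?_, ih hp.of_cons, ?_⟩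
    · exact (colEvts_pairwise cube round r (num_cols - 1)).map _
        (fun a b h => Or.inr ⟨rfl, by simp only; omega⟩)
    · intro x hx y hy
      rcases List.mem_map.mp hx with ⟨cb, _, hcb⟩
      rcases List.mem_flatMap.mp hy with ⟨r', hr', hy'⟩
      rcases List.mem_map.mp hy' with ⟨cb', _, hcb'⟩
      have hlt : r < r' := (List.pairwise_cons.mp hp).1 r' hr'
      rw [← hcb, ← hcb']
      exact Or.inl hlt

theorem blocks_pairwise (num_rows num_cols : Int) (cube round : List (Int × Int)) :
    (blocksOf num_cols cube round (rowsOf num_rows num_cols cube round)).Pairwise LexLt :=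
  blocks_pairwise_gen num_cols cube round _
    ((PySem.List.pairwise_lt_pyRange_one 0 num_rows).filter _)

theorem lexlt_asymm {a b : Int × Int × Bool} (h : LexLt a b) : ¬ LexLt b a := by
  unfold LexLt at *; omega

theorem lexlt_trans {a b c : Int × Int × Bool} (h1 : LexLt a b) (h2 : LexLt b c) : LexLt a c := by
  unfold LexLt at *; omega

theorem before_true_iff {a b : Int × Int × Bool} :
    (decide (a.1 < b.1) || (!decide (b.1 < a.1) && decide (-a.2.1 < -b.2.1))) = true ↔ LexLt a b := by
  unfold LexLt; simp; omega

theorem before_false_iff {a b : Int × Int × Bool} :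
    (decide (a.1 < b.1) || (!decide (b.1 < a.1) && decide (-a.2.1 < -b.2.1))) = false ↔ ¬ LexLt a b := by
  rw [← Bool.not_eq_true, not_iff_not]; exact before_true_iff

theorem insert_pw (x : Int × Int × Bool) :
    ∀ (ys : List (Int × Int × Bool)), ys.Pairwise (fun a b => ¬ LexLt b a) →
    (PySem.List.insertBy
        (fun a b => decide (a.1 < b.1) || (!decide (b.1 < a.1) && decide (-a.2.1 < -b.2.1)))
        x ys).Pairwise (fun a b => ¬ LexLt b a) := by
  intro ys
  induction ys with
  | nil => intro _; simp [PySem.List.insertBy]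
  | cons y ys ih =>
    intro hp
    rw [PySem.List.insertBy.eq_2]
    by_cases hb : (decide (x.1 < y.1) || (!decide (y.1 < x.1) && decide (-x.2.1 < -y.2.1))) = true
    · rw [if_pos hb]
      have hxy : LexLt x y := before_true_iff.mp hb
      refine List.pairwise_cons.mpr ⟨?_, hp⟩
      intro z hz
      rcases List.mem_cons.mp hz with rfl | hz'
      · exact lexlt_asymm hxy
      · intro hzx
        exact (List.pairwise_cons.mp hp).1 z hz' (lexlt_trans hzx hxy)
    · rw [if_neg hb]
      have hyx : ¬ LexLt x y := before_false_iff.mp (Bool.eq_false_iff.mpr hb)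
      refine List.pairwise_cons.mpr ⟨?_, ih (List.pairwise_cons.mp hp).2⟩
      intro z hz
      rcases (PySem.List.mem_insertBy _ _ _ _).mp hz with rfl | hz'
      · exact hyx
      · exact (List.pairwise_cons.mp hp).1 z hz'

theorem sorted2_pairwise_nonstrict (xs : List (Int × Int × Bool)) :
    (PySem.List.sorted2 xs (fun e => e.1) (fun e => -e.2.1) false).Pairwise
      (fun a b => ¬ LexLt b a) := by
  have hdef : PySem.List.sorted2 xs (fun e => e.1) (fun e => -e.2.1) false
      = xs.foldl (fun acc x => PySem.List.insertBy
          (fun a b => decide (a.1 < b.1) || (!decide (b.1 < a.1) && decide (-a.2.1 < -b.2.1)))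
          x acc) [] := rfl
  rw [hdef]
  have main : ∀ (l acc : List (Int × Int × Bool)), acc.Pairwise (fun a b => ¬ LexLt b a) →
      (l.foldl (fun acc x => PySem.List.insertBy
          (fun a b => decide (a.1 < b.1) || (!decide (b.1 < a.1) && decide (-a.2.1 < -b.2.1)))
          x acc) acc).Pairwise (fun a b => ¬ LexLt b a) := by
    intro l
    induction l with
    | nil => intro acc h; simpa using h
    | cons x l ih => intro acc h; exact ih _ (insert_pw x acc h)
  exact main xs [] (by simp)

theorem sorted_eq_blocks (num_rows num_cols : Int) (cube round : List (Int × Int))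
    (hc : cube.Nodup) (hr : round.Nodup) :
    PySem.List.sorted2 (eventsOf num_rows num_cols cube round) (fun e => e.1) (fun e => -e.2.1) false
      = blocksOf num_cols cube round (rowsOf num_rows num_cols cube round) := by
  have hpermS : (PySem.List.sorted2 (eventsOf num_rows num_cols cube round)
      (fun e => e.1) (fun e => -e.2.1) false).Perm (eventsOf num_rows num_cols cube round) :=
    PySem.List.sorted2_perm _ _ _ _
  have hndE := nodup_eventsOf (num_rows := num_rows) (num_cols := num_cols) hc hr
  have hpwB := blocks_pairwise num_rows num_cols cube round
  have hndB : (blocksOf num_cols cube round (rowsOf num_rows num_cols cube round)).Nodup :=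
    hpwB.imp (fun h => by intro heq; exact lexlt_asymm h (heq ▸ h))
  have hpermB : (blocksOf num_cols cube round (rowsOf num_rows num_cols cube round)).Perm
      (eventsOf num_rows num_cols cube round) :=
    (List.perm_ext_iff_of_nodup hndB hndE).mpr (fun e => by rw [mem_blocks, mem_eventsOf])
  refine List.Perm.eq_of_pairwise (le := fun a b => ¬ LexLt b a) ?_ (sorted2_pairwise_nonstrict _)
    (hpwB.imp (fun h => lexlt_asymm h)) (hpermS.trans hpermB.symm)
  intro a b ha hb hab hba
  have haE : a ∈ eventsOf num_rows num_cols cube round := hpermS.mem_iff.mp ha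
  have hbE : b ∈ eventsOf num_rows num_cols cube round := hpermB.mem_iff.mp hb
  have h1 : a.1 = b.1 := by unfold LexLt at hab hba; omega
  have h2 : a.2.1 = b.2.1 := by unfold LexLt at hab hba; omega
  exact key_inj haE hbE h1 h2

def stepB (st : List (Int × Int) × Option Int × Int) (e : Int × Int × Bool) :
    List (Int × Int) × Option Int × Int :=
  let st1 :=
    if st.2.1 ≠ some e.1 then
      (((PySem.List.pyRange 0 st.2.2 1).foldl
          (fun m k => PySem.Set.add m (st.2.1.getD 0, k)) st.1), some e.1, (0 : Int))
    else st
  if e.2.2 then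
    (((PySem.List.pyRange 0 st1.2.2 1).foldl
        (fun m k => PySem.Set.add m (e.1, e.2.1 + 1 + k)) st1.1), st1.2.1, (0 : Int))
  else (st1.1, st1.2.1, st1.2.2 + 1)

def bnd : List (Int × Bool) → Int → Int
  | [], k => k - 1
  | (c, _) :: _, k => c + k

theorem foldB_row (r : Int) :
    ∀ (ev : List (Int × Bool)), ev.Pairwise (fun a b => b.1 < a.1) → (∀ e ∈ ev, 0 ≤ e.1) →
    ∀ (k : Int) (m : List (Int × Int)), 0 ≤ k →
    (∀ p ∈ m, p.1 = r → bnd ev k < p.2) →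
    (ev.map (fun cb => (r, cb.1, cb.2))).foldl stepB (m, some r, k)
        = (m ++ (runRow r ev k).1, some r, (runRow r ev k).2)
      ∧ ∀ p ∈ m ++ (runRow r ev k).1, p.1 = r → (runRow r ev k).2 - 1 < p.2 := by
  intro ev
  induction ev with
  | nil =>
    intro _ _ k m hk hm
    refine ⟨by simp [runRow], ?_⟩
    intro p hp hpr
    simp only [runRow, List.append_nil] at hp ⊢
    exact hm p hp hpr
  | cons cb rest ih =>
    intro hdec hpos k m hk hm
    obtain ⟨c, b⟩ := cb
    have hc0 : (0:Int) ≤ c := hpos (c, b) List.mem_cons_self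
    have hbnd_rest : ∀ k', bnd rest k' ≤ c - 1 + k' := by
      intro k'
      cases rest with
      | nil => simp [bnd]; omega
      | cons cb' rest' =>
        obtain ⟨c', b'⟩ := cb'
        have := (List.pairwise_cons.mp hdec).1 (c', b') List.mem_cons_self
        simp only at this
        simp [bnd]; omega
    simp only [List.map_cons, List.foldl_cons]
    have hstep : stepB (m, some r, k) (r, c, b)
        = if b then
            ((PySem.List.pyRange 0 k 1).foldl
              (fun m' j => PySem.Set.add m' (r, c + 1 + j)) m, some r, (0 : Int))
          else (m, some r, k + 1) := by
      simp [stepB]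
    rw [hstep]
    cases b
    · -- round rock: count up
      simp only [if_neg (Bool.false_ne_true)]
      have hm' : ∀ p ∈ m, p.1 = r → bnd rest (k + 1) < p.2 := by
        intro p hp hpr
        have h1 := hm p hp hpr
        have h2 := hbnd_rest (k + 1)
        simp only [bnd] at h1
        omega
      have := ih (List.pairwise_cons.mp hdec).2
        (fun e he => hpos e (List.mem_cons_of_mem _ he)) (k + 1) m (by omega) hm'
      simpa [runRow] using this
    · -- cube rock: flush k pending rocks east of it
      simp only [if_pos rfl, if_true]
      have hflush : (PySem.List.pyRange 0 k 1).foldl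
          (fun m' j => PySem.Set.add m' (r, c + 1 + j)) m
            = m ++ flushVals r (c + 1) k := by
        have he : (fun (m' : List (Int × Int)) j => PySem.Set.add m' (r, c + 1 + j))
            = (fun m' j => PySem.Set.add m' (r, (c + 1) + j)) := rfl
        rw [he]
        refine flush_fold k m ?_
        intro j h0 hj hmem
        have := hm _ hmem rfl
        simp only [bnd] at this
        omega
      rw [hflush]
      have hm' : ∀ p ∈ m ++ flushVals r (c + 1) k, p.1 = r → bnd rest 0 < p.2 := by
        intro p hp hpr
        have h2 := hbnd_rest 0
        rcases List.mem_append.mp hp with h1 | h1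
        · have := hm p h1 hpr; simp only [bnd] at this; omega
        · rcases mem_flushVals.mp h1 with ⟨_, h3, _⟩; omega
      have := ih (List.pairwise_cons.mp hdec).2
        (fun e he => hpos e (List.mem_cons_of_mem _ he)) 0
        (m ++ flushVals r (c + 1) k) le_rfl hm'
      refine ⟨?_, ?_⟩
      · rw [this.1]; simp [runRow]
      · intro p hp hpr
        have h4 := this.2 p (by simpa [runRow, List.append_assoc] using hp) hpr
        simpa [runRow] using h4

theorem flush_fold_zero {q : Int} (k : Int) (m : List (Int × Int))
    (h : ∀ j, 0 ≤ j → j < k → (q, j) ∉ m) :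
    (PySem.List.pyRange 0 k 1).foldl (fun m' c => PySem.Set.add m' (q, c)) m
      = m ++ flushVals q 0 k := by
  have he : (fun (m' : List (Int × Int)) c => PySem.Set.add m' (q, c))
      = (fun m' c => PySem.Set.add m' (q, 0 + c)) := by
    funext m' c; norm_num
  rw [he]
  exact flush_fold k m (fun j h0 hj => by simpa using h j h0 hj)

theorem foldB_blocks (num_cols : Int) (cube round : List (Int × Int)) :
    ∀ (rs : List Int), rs.Pairwise (· < ·) →
    (∀ r ∈ rs, colEvts cube round r (num_cols - 1) ≠ []) →
    ∀ (m : List (Int × Int)) (cur : Option Int) (cnt : Int), 0 ≤ cnt →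
    (cur = none → cnt = 0) →
    (∀ p ∈ m, p.1 ∉ rs) →
    (∀ t, cur = some t → t ∉ rs) →
    (∀ t, cur = some t → ∀ p ∈ m, p.1 = t → cnt - 1 < p.2) →
    (let fin := (blocksOf num_cols cube round rs).foldl stepB (m, cur, cnt)
     (PySem.List.pyRange 0 fin.2.2 1).foldl
        (fun m' k => PySem.Set.add m' (fin.2.1.getD 0, k)) fin.1)
      = m ++ flushVals (cur.getD 0) 0 cnt ++ rs.flatMap (outRow num_cols cube round) := by
  intro rs
  induction rs with
  | nil =>
    intro _ _ m cur cnt hcnt hnone _ _ hpend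
    simp only [blocksOf, List.flatMap_nil, List.foldl_nil, List.append_nil]
    refine flush_fold_zero cnt m ?_
    intro j h0 hj hmem
    cases cur with
    | none => have := hnone rfl; omega
    | some t =>
      have := hpend t rfl (t, j) (by simpa using hmem) rfl
      simp at this; omega
  | cons r rs' ih =>
    intro hp hne m cur cnt hcnt hnone hm hcur hpend
    have hcurr : cur ≠ some r := by
      intro heq; exact hcur r heq List.mem_cons_self
    -- the block of row r is nonempty
    rcases hev : colEvts cube round r (num_cols - 1) with _ | ⟨cb, tl⟩
    · exact absurd hev (hne r List.mem_cons_self)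
    have hpend' : ∀ j, 0 ≤ j → j < cnt → (cur.getD 0, j) ∉ m := by
      intro j h0 hj hmem
      cases cur with
      | none => have := hnone rfl; omega
      | some t =>
        have := hpend t rfl (t, j) (by simpa using hmem) rfl
        simp at this; omega
    have henter : ∀ (e0 : Int × Int × Bool) (tail : List (Int × Int × Bool)), e0.1 = r →
        ((e0 :: tail).foldl stepB (m, cur, cnt))
          = ((e0 :: tail).foldl stepB
              (m ++ flushVals (cur.getD 0) 0 cnt, some r, 0)) := by
      intro e0 tail he0
      simp only [List.foldl_cons]
      congr 1
      have hne' : cur ≠ some e0.1 := by rw [he0]; exact hcurr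
      have hc1 : (¬cur = some e0.1) = True := by simp [hne']
      have hc2 : (¬(some r) = some e0.1) = False := by simp [he0]
      simp only [stepB, ne_eq, hc1, hc2, if_true, if_false]
      rw [flush_fold_zero cnt m hpend']
      rw [he0]
    -- run the block of row r
    have hdec := colEvts_pairwise cube round r (num_cols - 1)
    rw [hev] at hdec
    have hpos : ∀ e ∈ cb :: tl, (0:Int) ≤ e.1 := by
      intro e he
      have : e ∈ colEvts cube round r (num_cols - 1) := by rw [hev]; exact he
      exact (mem_colEvts.mp this).1
    have hm1 : ∀ p ∈ m ++ flushVals (cur.getD 0) 0 cnt, p.1 = r →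
        bnd (cb :: tl) 0 < p.2 := by
      intro p hp' hpr
      rcases List.mem_append.mp hp' with h1 | h1
      · exact absurd hpr (by
          intro heq; exact hm p h1 (heq ▸ List.mem_cons_self))
      · have h2 := (mem_flushVals.mp h1).1
        cases cur with
        | none =>
          have := hnone rfl
          subst this
          simp [flushVals, PySem.List.pyRange_one_eq_nil] at h1
        | some t =>
          exfalso
          apply hcur t rfl
          simp only [Option.getD_some] at h2
          rw [← h2, hpr]
          exact List.mem_cons_self
    have hrow := foldB_row r (cb :: tl) hdec hpos 0
      (m ++ flushVals (cur.getD 0) 0 cnt) le_rfl hm1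
    have hknn : 0 ≤ (runRow r (cb :: tl) 0).2 := runRow_cnt_nonneg _ 0 le_rfl
    have hrnotin : r ∉ rs' := by
      intro hmem
      exact absurd ((List.pairwise_cons.mp hp).1 r hmem) (lt_irrefl r)
    -- assemble
    simp only [blocksOf, List.flatMap_cons, List.foldl_append]
    rw [hev]
    simp only [List.map_cons]
    rw [henter (r, cb.1, cb.2) _ rfl]
    have hmapeq : (r, cb.1, cb.2) :: List.map (fun cb => (r, cb.1, cb.2)) tl
        = List.map (fun cb => (r, cb.1, cb.2)) (cb :: tl) := by simp
    rw [hmapeq, hrow.1]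
    have hih := ih hp.of_cons (fun r' hr' => hne r' (List.mem_cons_of_mem _ hr'))
      (m ++ flushVals (cur.getD 0) 0 cnt ++ (runRow r (cb :: tl) 0).1)
      (some r) (runRow r (cb :: tl) 0).2 hknn (by intro h; injection h)
      (by
        intro p hp' hmem
        rcases List.mem_append.mp hp' with h1 | h1
        · rcases List.mem_append.mp h1 with h2 | h2
          · exact hm p h2 (List.mem_cons_of_mem _ hmem)
          · have h3 := (mem_flushVals.mp h2).1
            cases cur with
            | none =>
              have := hnone rfl; subst this
              simp [flushVals, PySem.List.pyRange_one_eq_nil] at h2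
            | some t =>
              apply hcur t rfl
              simp only [Option.getD_some] at h3
              rw [h3] at hmem
              exact List.mem_cons_of_mem _ hmem
        · have := runRow_fst _ _ _ h1
          rw [this] at hmem
          exact hrnotin hmem)
      (by intro t ht; injection ht with ht; subst ht; exact hrnotin)
      (by
        intro t ht; injection ht with ht; subst ht
        intro p hp' hpr
        exact hrow.2 p (by simpa [List.append_assoc] using hp') hpr)
    simp only [blocksOf] at hih
    rw [hih]
    simp [outRow, hev, List.append_assoc]

theorem B_flat (num_rows num_cols : Int) (cube round : List (Int × Int))
    (hc : cube.Nodup) (hr : round.Nodup) :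
    slide_rocks_west_alt num_rows num_cols cube round
      = (rowsOf num_rows num_cols cube round).flatMap (outRow num_cols cube round) := by
  have hdef : slide_rocks_west_alt num_rows num_cols cube round
      = (let fin := (PySem.List.sorted2 (eventsOf num_rows num_cols cube round)
            (fun e => e.1) (fun e => -e.2.1) false).foldl stepB ([], none, (0 : Int))
         (PySem.List.pyRange 0 fin.2.2 1).foldl
           (fun m' k => PySem.Set.add m' (fin.2.1.getD 0, k)) fin.1) := rfl
  rw [hdef]
  simp only [sorted_eq_blocks num_rows num_cols cube round hc hr]
  have h := foldB_blocks num_cols cube round (rowsOf num_rows num_cols cube round)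
    ((PySem.List.pairwise_lt_pyRange_one 0 num_rows).filter _)
    (by
      intro r hr'
      have := (List.mem_filter.mp hr').2
      simpa using this)
    [] none 0 le_rfl (fun _ => rfl) (by simp) (by intro t ht; cases ht) (by intro t ht; cases ht)
  simp only at h
  rw [h]
  simp [flushVals, PySem.List.pyRange_one_eq_nil]

theorem outRow_nil {num_cols : Int} {cube round : List (Int × Int)} {r : Int}
    (h : colEvts cube round r (num_cols - 1) = []) : outRow num_cols cube round r = [] := by
  simp [outRow, h, runRow, flushVals, PySem.List.pyRange_one_eq_nil]

theorem flatMap_filter (num_cols : Int) (cube round : List (Int × Int)) :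
    ∀ (l : List Int),
    (l.filter (fun r => !(colEvts cube round r (num_cols - 1)).isEmpty)).flatMap
        (outRow num_cols cube round)
      = l.flatMap (outRow num_cols cube round) := by
  intro l
  induction l with
  | nil => simp
  | cons r l ih =>
    by_cases hr : colEvts cube round r (num_cols - 1) = []
    · rw [List.filter_cons, if_neg (by simp [hr])]
      simp only [List.flatMap_cons, ih, outRow_nil hr, List.nil_append]
    · rw [List.filter_cons, if_pos (by simp [List.isEmpty_iff, hr])]
      simp only [List.flatMap_cons, ih]

-- ===== VERDICT (by name: the statement is the Claim_ definition above) =====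
theorem slide_rocks_west_spec : Claim_equal_slide_rocks_west := by
  intro num_rows num_cols cube round _ hpre
  unfold Spec_slide_rocks_west
  rw [A_flat, B_flat num_rows num_cols cube round hpre.1 hpre.2]
  rw [rowsOf, flatMap_filter]
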